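-- pv_equiv track=rewrite | github.com/dhchoi-de/Algorithm | stack/develop_function.py | solution
-- ===== SOURCE A (Python) =====
-- from collections import deque
--
-- def solution(progresses, speeds):
--     answer = []
--     is_break = False
--     while progresses:
--         if is_break:
--             break
--
--         release = 0
--         progresses = [min(progress+speed, 100) for progress, speed in zip(progresses, speeds)]
--
--         queue = deque(progresses)
--         speed_queue = deque(speeds)
--
--         while queue:
--             if queue[0] == 100:
--                 queue.popleft()
--                 speed_queue.popleft()
--                 release += 1
--             else:
--                 if release >= 1:
--                     answer.append(release)
--                 progresses = list(queue)
--                 speeds = list(speed_queue)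
--                 break
--
--             if not queue:
--                 answer.append(release)
--                 is_break = True
--                 break
--
--     return answer
-- ===== SOURCE B (Python) =====
-- def solution(progresses, speeds):
--     # Single pass: compute each task's finish day by ceiling division, then emit
--     # run lengths of consecutive tasks whose finish day does not exceed the
--     # current group leader's day.
--     answer = []
--     prev_day = None
--     count = 0
--     for p, s in zip(progresses, speeds):
--         d = 1 if p + s >= 100 else -((p - 100) // s)
--         if prev_day is None or d > prev_day:
--             if count:
--                 answer.append(count)
--             prev_day = d
--             count = 1
--         else:
--             count += 1
--     if count:
--         answer.append(count)
--     return answer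
-- ===== Notes on version B (the rewrite author's own statement) =====
-- stated objective: alternative
-- what changed: A simulates the release process day by day (advancing every remaining task each day and popping completed ones), while B computes each task's finish day directly with one ceiling division and emits the group sizes in a single pass over the zipped lists; intended as faster (A is O(n*D) in the number of days D), but a timing run could not confirm a ratio because A does not finish at the sizes where B still returns.
-- outside the precondition, e.g. on solution([200], [-5]): A returns [1], B returns [1]; on solution([150], [0]): A returns [1], B returns [1]
import Mathlib
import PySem

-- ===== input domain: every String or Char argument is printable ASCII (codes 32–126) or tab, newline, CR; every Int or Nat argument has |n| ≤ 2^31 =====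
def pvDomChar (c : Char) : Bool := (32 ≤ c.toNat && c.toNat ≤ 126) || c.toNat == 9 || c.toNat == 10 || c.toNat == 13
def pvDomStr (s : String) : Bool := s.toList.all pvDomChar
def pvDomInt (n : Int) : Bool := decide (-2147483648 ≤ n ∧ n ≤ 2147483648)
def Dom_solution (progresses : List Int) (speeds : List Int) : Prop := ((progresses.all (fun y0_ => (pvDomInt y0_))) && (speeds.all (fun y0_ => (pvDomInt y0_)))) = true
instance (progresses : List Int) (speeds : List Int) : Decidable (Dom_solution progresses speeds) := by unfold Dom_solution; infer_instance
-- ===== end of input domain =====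

-- B replaces A's day-by-day simulation by a single pass: each task's finish day is a
-- ceiling division, and answers are run lengths of tasks not exceeding the group
-- leader's day.  Equivalence is proved on Pre_ (all zipped speeds ≥ 1; otherwise A
-- can loop forever).  A reassigns its parameters locally only; no caller-visible mutation.

-- ===== PORT A =====
-- inner `while queue:` loop of A: pops leading 100s, counting them in `rel`;
-- the Bool is Python's `is_break` (queue ran empty inside the loop).
def solInner : List Int → List Int → Int → (Int × List Int × List Int × Bool)
  | [], sq, rel => (rel, [], sq, false)
  | d :: rest, sq, rel =>
    if d = 100 then
      if rest = [] then (rel + 1, rest, sq.drop 1, true)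
      else solInner rest (sq.drop 1) (rel + 1)
    else (rel, d :: rest, sq, false)

-- fuel bounding the number of iterations of A's outer `while progresses:` loop
-- (with Pre_ below, at most max finish day ≤ this many days pass)
def solFuel (ps : List Int) : Nat := 1 + (ps.map (fun p => (100 - p).toNat + 1)).sum

-- outer `while progresses:` loop of A
def solLoop : Nat → List Int → List Int → List Int → List Int
  | 0, _, _, ans => ans
  | fuel + 1, ps, ss, ans =>
    if ps = [] then ans
    else
      let ps' := (ps.zip ss).map (fun x => min (x.1 + x.2) 100)
      match solInner ps' ss 0 with
      | (rel, q, sq, isBreak) =>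
        if isBreak then ans ++ [rel]
        else solLoop fuel q sq (if 1 ≤ rel then ans ++ [rel] else ans)

def solution (progresses : List Int) (speeds : List Int) : List Int :=
  solLoop (solFuel progresses) progresses speeds []

-- ===== PORT B =====
-- finish day of one task: 1 if it completes after the first day, else ceil((100-p)/s)
def dayOf (p s : Int) : Int :=
  if 100 ≤ p + s then 1 else -(PySem.Int.floordiv (p - 100) s)

-- B's single grouping pass: prev_day (None initially), count, answer
def groupLoop : List Int → Option Int → Int → List Int → List Int
  | [], _, count, ans => if count ≠ 0 then ans ++ [count] else ans
  | d :: rest, none, count, ans =>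
      groupLoop rest (some d) 1 (if count ≠ 0 then ans ++ [count] else ans)
  | d :: rest, some pd, count, ans =>
      if pd < d then groupLoop rest (some d) 1 (if count ≠ 0 then ans ++ [count] else ans)
      else groupLoop rest (some pd) (count + 1) ans

def solution_alt (progresses : List Int) (speeds : List Int) : List Int :=
  groupLoop ((progresses.zip speeds).map (fun x => dayOf x.1 x.2)) none 0 []

-- ===== PRECONDITION & SPEC =====
-- Pre_ excludes non-positive speeds (among the zipped pairs): there A loops forever
-- whenever some task below 100 never reaches it; on the residual such inputs where
-- every task still finishes, A returns and B happens to return the same value.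
def Pre_solution (progresses : List Int) (speeds : List Int) : Prop :=
  ∀ x ∈ progresses.zip speeds, 1 ≤ x.2
instance (progresses : List Int) (speeds : List Int) : Decidable (Pre_solution progresses speeds) := by unfold Pre_solution; infer_instance
def pvWitness_solution : List Int × List Int := ([93, 30, 55], [1, 30, 5])

def Spec_solution (progresses : List Int) (speeds : List Int) (out : List Int) : Prop := out = solution_alt progresses speeds
instance (progresses : List Int) (speeds : List Int) (out : List Int) : Decidable (Spec_solution progresses speeds out) := by unfold Spec_solution; infer_instance

-- ===== CLAIM (what is proved, stated in full; the proofs are below) =====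
def Claim_equal_solution : Prop := ∀ (progresses : List Int) (speeds : List Int), Dom_solution progresses speeds → Pre_solution progresses speeds → Spec_solution progresses speeds (solution progresses speeds)

-- ===== LEMMAS AND PROOFS =====

-- abbreviations used by the proofs only
def dayF (x : Int × Int) : Int := dayOf x.1 x.2
def advP (x : Int × Int) : Int × Int := (min (x.1 + x.2) 100, x.2)
def deltaD (d : Int) : Int := max 1 (d - 1)
def maxD (l : List Int) : Nat := l.foldr (fun d m => max d.toNat m) 0

-- reference grouping function: first group = leader + following days ≤ leader
def g : List Int → List Int
  | [] => []
  | d :: rest =>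
      ((1 : Int) + (rest.takeWhile (fun e => e ≤ d)).length) ::
        g (rest.dropWhile (fun e => e ≤ d))
termination_by l => l.length
decreasing_by
  simp only [List.length_cons]
  exact Nat.lt_succ_of_le (List.length_dropWhile_le _ _)

-- floor-division bracket
theorem fd_bounds (p s : Int) (hs : 1 ≤ s) :
    (PySem.Int.floordiv (p - 100) s) * s ≤ p - 100 ∧
    p - 100 < (PySem.Int.floordiv (p - 100) s + 1) * s := by
  exact (PySem.Int.floordiv_eq_iff_of_pos (by omega)).mp rfl

theorem dayOf_pos (p s : Int) (hs : 1 ≤ s) : 1 ≤ dayOf p s := by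
  unfold dayOf
  split_ifs with h
  · omega
  · obtain ⟨h1, h2⟩ := fd_bounds p s hs
    nlinarith

theorem dayOf_two (p s : Int) (hs : 1 ≤ s) (h : p + s < 100) : 2 ≤ dayOf p s := by
  unfold dayOf
  rw [if_neg (by omega)]
  obtain ⟨h1, h2⟩ := fd_bounds p s hs
  nlinarith

theorem dayOf_eq_one_iff (p s : Int) (hs : 1 ≤ s) : dayOf p s = 1 ↔ 100 ≤ p + s := by
  constructor
  · intro h
    by_contra hc
    have := dayOf_two p s hs (by omega)
    omega
  · intro h; simp [dayOf, h]

theorem floor_unique {s a b x : Int} (hs : 0 < s) (h1 : a * s ≤ x) (h2 : x < (a + 1) * s)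
    (h3 : b * s ≤ x) (h4 : x < (b + 1) * s) : a = b := by
  have hab : a < b + 1 := lt_of_mul_lt_mul_right (lt_of_le_of_lt h1 h4) (le_of_lt hs)
  have hba : b < a + 1 := lt_of_mul_lt_mul_right (lt_of_le_of_lt h3 h2) (le_of_lt hs)
  omega

theorem dayOf_adv (p s : Int) (hs : 1 ≤ s) :
    dayOf (min (p + s) 100) s = deltaD (dayOf p s) := by
  rcases le_or_gt 100 (p + s) with h | h
  · have hmin : min (p + s) 100 = 100 := by omega
    rw [hmin]
    have h100 : dayOf 100 s = 1 := (dayOf_eq_one_iff 100 s hs).mpr (by omega)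
    have h1 : dayOf p s = 1 := (dayOf_eq_one_iff p s hs).mpr h
    simp [h100, h1, deltaD]
  · have hmin : min (p + s) 100 = p + s := by omega
    rw [hmin]
    obtain ⟨hb1, hb2⟩ := fd_bounds p s hs
    rcases le_or_gt 100 (p + s + s) with h2 | h2
    · -- finishes on day 2: new day 1, old day 2
      have hnew : dayOf (p + s) s = 1 := (dayOf_eq_one_iff (p + s) s hs).mpr (by omega)
      have hold : dayOf p s = 2 := by
        unfold dayOf
        rw [if_neg (by omega)]
        have : PySem.Int.floordiv (p - 100) s = -2 :=
          floor_unique (by omega) hb1 hb2 (by nlinarith) (by nlinarith)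
        omega
      simp [hnew, hold, deltaD]
    · -- both still unfinished: ceilings shift by one
      obtain ⟨hc1, hc2⟩ := fd_bounds (p + s) s hs
      have hshift : PySem.Int.floordiv (p + s - 100) s = PySem.Int.floordiv (p - 100) s + 1 :=
        floor_unique (by omega) hc1 hc2 (by nlinarith) (by nlinarith)
      have hold2 : 2 ≤ dayOf p s := dayOf_two p s hs (by omega)
      unfold dayOf at *
      rw [if_neg (by omega), if_neg (by omega)] at *
      rw [hshift]
      unfold deltaD
      omega

-- ---- list bookkeeping lemmas ----

theorem zip_adv (ps ss : List Int) :
    (((ps.zip ss).map (fun x => min (x.1 + x.2) 100)).zip ss) = (ps.zip ss).map advP := by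
  induction ps generalizing ss with
  | nil => simp
  | cons p pt ih =>
    cases ss with
    | nil => simp
    | cons s st => simp [advP, ih st]

theorem zip_drop (l1 l2 : List Int) (k : Nat) :
    (l1.drop k).zip (l2.drop k) = (l1.zip l2).drop k := by
  induction l1 generalizing l2 k with
  | nil => simp
  | cons a t ih =>
    cases l2 with
    | nil => simp
    | cons b u =>
      cases k with
      | zero => simp
      | succ k => simpa using ih u k

theorem dropWhile_eq_drop (l : List Int) (P : Int → Bool) :
    l.dropWhile P = l.drop (l.takeWhile P).length := by
  induction l with
  | nil => simp
  | cons a t ih =>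
    by_cases h : P a
    · simp [List.dropWhile_cons, List.takeWhile_cons, h, ih]
    · simp [List.dropWhile_cons, List.takeWhile_cons, h]

theorem takeWhile_congr_mem {α : Type} (l : List α) (P Q : α → Bool)
    (h : ∀ x ∈ l, P x = Q x) : l.takeWhile P = l.takeWhile Q := by
  induction l with
  | nil => rfl
  | cons a t ih =>
    have ha := h a (by simp)
    by_cases hP : P a
    · rw [List.takeWhile_cons_of_pos hP, List.takeWhile_cons_of_pos (by rw [← ha]; exact hP),
        ih (fun x hx => h x (by simp [hx]))]
    · rw [List.takeWhile_cons_of_neg (by simpa using hP),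
        List.takeWhile_cons_of_neg (by rw [← ha]; simpa using hP)]

theorem dropWhile_congr_mem {α : Type} (l : List α) (P Q : α → Bool)
    (h : ∀ x ∈ l, P x = Q x) : l.dropWhile P = l.dropWhile Q := by
  induction l with
  | nil => rfl
  | cons a t ih =>
    have ha := h a (by simp)
    by_cases hP : P a
    · rw [List.dropWhile_cons_of_pos hP, List.dropWhile_cons_of_pos (by rw [← ha]; exact hP),
        ih (fun x hx => h x (by simp [hx]))]
    · rw [List.dropWhile_cons_of_neg (by simpa using hP),
        List.dropWhile_cons_of_neg (by rw [← ha]; simpa using hP)]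

theorem dropWhile_head_not (l : List Int) (P : Int → Bool) :
    ∀ d ∈ (l.dropWhile P).head?, P d = false := by
  induction l with
  | nil => simp
  | cons a t ih =>
    by_cases h : P a
    · simpa [List.dropWhile_cons, h] using ih
    · simp [List.dropWhile_cons, h]

-- ---- characterizations of the two loops ----

theorem inner_eq (q sq : List Int) (rel : Int) :
    solInner q sq rel =
      (let k := (q.takeWhile (fun e => decide (e = 100))).length
       if k = q.length ∧ q ≠ [] then (rel + (k : Int), [], sq.drop k, true)
       else (rel + (k : Int), q.drop k, sq.drop k, false)) := by
  induction q generalizing sq rel with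
  | nil => simp [solInner]
  | cons d rest ih =>
    by_cases hd : d = 100
    · subst hd
      cases rest with
      | nil => simp [solInner]
      | cons e u =>
        rw [show solInner (100 :: e :: u) sq rel = solInner (e :: u) (sq.drop 1) (rel + 1) by
          simp [solInner]]
        rw [ih (sq.drop 1) (rel + 1)]
        have hlen : ((e :: u).takeWhile (fun x => decide (x = 100))).length ≤ (e :: u).length :=
          (List.takeWhile_prefix _).length_le
        have htw : List.takeWhile (fun x => decide (x = 100)) (100 :: e :: u)
            = 100 :: List.takeWhile (fun x => decide (x = 100)) (e :: u) := by simp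
        rw [htw]
        set m := (List.takeWhile (fun e => decide (e = 100)) (e :: u)).length with hm
        by_cases hall : m = u.length + 1
        · rw [if_pos ⟨hall, by simp⟩, if_pos ⟨by simp; exact hall, by simp⟩]
          simp only [htw, List.length_cons, List.drop_drop, Prod.ext_iff]
          refine ⟨?_, ?_, ?_, ?_⟩ <;>
            first
              | trivial
              | (rw [← hm]; push_cast; ring)
              | (rw [← hm]; omega)
              | (rw [← hm])
        · rw [if_neg (by rintro ⟨h, -⟩; exact hall (by simpa using h)),
            if_neg (by rintro ⟨h, -⟩; exact hall (by simpa using h))]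
          simp only [htw, List.length_cons, List.drop_drop, List.drop_succ_cons, Prod.ext_iff]
          refine ⟨?_, ?_, ?_, ?_⟩ <;>
            first
              | trivial
              | (rw [← hm]; push_cast; ring)
              | (rw [← hm]; omega)
              | (rw [← hm])
    · rw [show solInner (d :: rest) sq rel = (rel, d :: rest, sq, false) by simp [solInner, hd]]
      simp [List.takeWhile_cons, hd]

theorem groupLoop_eq (l : List Int) (d c : Int) (ans : List Int) (hc : 1 ≤ c) :
    groupLoop l (some d) c ans =
      ans ++ (c + ((l.takeWhile (fun e => e ≤ d)).length : Int))
        :: g (l.dropWhile (fun e => e ≤ d)) := by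
  induction l generalizing d c ans with
  | nil => simp [groupLoop, g]; omega
  | cons e rest ih =>
    by_cases he : d < e
    · rw [show groupLoop (e :: rest) (some d) c ans
          = groupLoop rest (some e) 1 (ans ++ [c]) by
        rw [groupLoop, if_pos he, if_pos (by omega : c ≠ 0)]]
      rw [ih e 1 (ans ++ [c]) (by omega)]
      rw [List.takeWhile_cons_of_neg (by simpa using (by omega : ¬ e ≤ d)),
        List.dropWhile_cons_of_neg (by simpa using (by omega : ¬ e ≤ d))]
      rw [g]
      simp
    · rw [show groupLoop (e :: rest) (some d) c ans = groupLoop rest (some d) (c + 1) ans by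
        rw [groupLoop, if_neg he]]
      rw [ih d (c + 1) ans (by omega)]
      rw [List.takeWhile_cons_of_pos (by simpa using (by omega : e ≤ d)),
        List.dropWhile_cons_of_pos (by simpa using (by omega : e ≤ d))]
      simp
      ring

theorem alt_eq_g (ps ss : List Int) :
    solution_alt ps ss = g ((ps.zip ss).map dayF) := by
  unfold solution_alt
  have : (ps.zip ss).map (fun x => dayOf x.1 x.2) = (ps.zip ss).map dayF := rfl
  rw [this]
  cases hD : (ps.zip ss).map dayF with
  | nil => simp [groupLoop, g]
  | cons d rest =>
    rw [show groupLoop (d :: rest) none 0 [] = groupLoop rest (some d) 1 [] by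
      simp [groupLoop]]
    rw [groupLoop_eq rest d 1 [] (by omega), g]
    simp

-- ---- lemmas about g ----

theorem g_all_one (D : List Int) (hne : D ≠ []) (h : ∀ d ∈ D, d = 1) :
    g D = [(D.length : Int)] := by
  cases D with
  | nil => exact absurd rfl hne
  | cons d rest =>
    have hd : d = 1 := h d (by simp)
    have hd : d = 1 := h d (by simp)
    have htw : rest.takeWhile (fun e => e ≤ d) = rest :=
      List.takeWhile_eq_self_iff.mpr (by intro x hx; have := h x (by simp [hx]); simp; omega)
    have hdw : rest.dropWhile (fun e => e ≤ d) = [] :=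
      List.dropWhile_eq_nil_iff.mpr (by intro x hx; have := h x (by simp [hx]); simp; omega)
    rw [g, htw, hdw, g]
    simp
    push_cast
    ring

theorem g_leading (D : List Int) (hpos : ∀ d ∈ D, 1 ≤ d)
    (k : Nat) (hk : k = (D.takeWhile (fun e => decide (e = 1))).length)
    (h1 : 1 ≤ k) (h2 : k < D.length) :
    g D = (k : Int) :: g (D.drop k) := by
  cases D with
  | nil => simp at h2
  | cons d rest =>
    have hd : d = 1 := by
      by_contra hd
      rw [List.takeWhile_cons_of_neg (by simpa using hd)] at hk
      simp at hk
      omega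
    subst hd
    rw [List.takeWhile_cons_of_pos (by simp)] at hk
    have htw : rest.takeWhile (fun e => e ≤ (1 : Int)) = rest.takeWhile (fun e => decide (e = 1)) :=
      takeWhile_congr_mem rest _ _ (by
        intro x hx; have := hpos x (by simp [hx]); simp; omega)
    have hdw : rest.dropWhile (fun e => e ≤ (1 : Int)) = rest.dropWhile (fun e => decide (e = 1)) :=
      dropWhile_congr_mem rest _ _ (by
        intro x hx; have := hpos x (by simp [hx]); simp; omega)
    rw [g, htw, hdw, dropWhile_eq_drop]
    have hk' : k = (rest.takeWhile (fun e => decide (e = 1))).length + 1 := by simpa using hk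
    rw [hk', List.drop_succ_cons]
    congr 1
    push_cast
    ring

theorem g_map_delta (D : List Int) (hpos : ∀ d ∈ D, 1 ≤ d)
    (hhead : ∀ d ∈ D.head?, 2 ≤ d) :
    g (D.map deltaD) = g D := by
  induction hn : D.length using Nat.strong_induction_on generalizing D with
  | _ n ih =>
    cases D with
    | nil => simp
    | cons d rest =>
      have hd2 : 2 ≤ d := hhead d (by simp)
      rw [List.map_cons, g, g]
      have htw : (rest.map deltaD).takeWhile (fun e => e ≤ deltaD d)
          = (rest.takeWhile (fun e => e ≤ d)).map deltaD := by
        rw [List.takeWhile_map]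
        congr 1
        apply takeWhile_congr_mem
        intro x hx
        have hx1 := hpos x (by simp [hx])
        simp only [Function.comp, deltaD, decide_eq_decide, max_def]
        split_ifs <;> omega
      have hdw : (rest.map deltaD).dropWhile (fun e => e ≤ deltaD d)
          = (rest.dropWhile (fun e => e ≤ d)).map deltaD := by
        rw [List.dropWhile_map]
        congr 1
        apply dropWhile_congr_mem
        intro x hx
        have hx1 := hpos x (by simp [hx])
        simp only [Function.comp, deltaD, decide_eq_decide, max_def]
        split_ifs <;> omega
      rw [htw, hdw]
      congr 1
      · simp
      · apply ih (rest.dropWhile (fun e => e ≤ d)).length ?_ _ ?_ ?_ rfl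
        · subst hn
          simp only [List.length_cons]
          exact Nat.lt_succ_of_le (List.length_dropWhile_le _ _)
        · intro x hx
          exact hpos x (by simp [List.dropWhile_sublist (fun e => decide (e ≤ d)) |>.mem hx])
        · intro x hx
          have h1 := dropWhile_head_not rest (fun e => decide (e ≤ d)) x hx
          simp at h1
          omega

-- ---- maxD lemmas ----

theorem maxD_mem (D : List Int) (d : Int) (h : d ∈ D) : d.toNat ≤ maxD D := by
  induction D with
  | nil => simp at h
  | cons a t ih =>
    rcases List.mem_cons.mp h with rfl | h
    · simp [maxD]
    · simp only [maxD, List.foldr] at *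
      exact le_trans (ih h) (Nat.le_max_right _ _)

theorem maxD_map_delta (D : List Int) (hpos : ∀ d ∈ D, 1 ≤ d) :
    maxD (D.map deltaD) ≤ max 1 (maxD D - 1) := by
  induction D with
  | nil => simp [maxD]
  | cons a t ih =>
    have ha := hpos a (by simp)
    have iht := ih (fun d hd => hpos d (by simp [hd]))
    simp only [maxD, List.map, List.foldr] at *
    have : (deltaD a).toNat = max 1 (a.toNat - 1) := by unfold deltaD; omega
    omega

theorem maxD_drop (D : List Int) (k : Nat) : maxD (D.drop k) ≤ maxD D := by
  induction D generalizing k with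
  | nil => simp
  | cons a t ih =>
    cases k with
    | zero => simp
    | succ k =>
      simp only [List.drop]
      exact le_trans (ih k) (by simp only [maxD, List.foldr]; omega)

-- ---- the main simulation lemma ----

theorem dayF_pos (z : List (Int × Int)) (h : ∀ x ∈ z, 1 ≤ x.2) :
    ∀ d ∈ z.map dayF, 1 ≤ d := by
  intro d hd
  obtain ⟨x, hx, rfl⟩ := List.mem_map.mp hd
  exact dayOf_pos x.1 x.2 (h x hx)

theorem main_loop (fuel : Nat) :
    ∀ ps ss ans : List Int, (∀ x ∈ ps.zip ss, 1 ≤ x.2) →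
      maxD ((ps.zip ss).map dayF) ≤ fuel →
      solLoop fuel ps ss ans = ans ++ g ((ps.zip ss).map dayF) := by
  induction fuel with
  | zero =>
    intro ps ss ans hpre hmax
    cases hz : ps.zip ss with
    | nil => simp [solLoop, hz, g]
    | cons x t =>
      exfalso
      have hs := hpre x (by rw [hz]; simp)
      have h1 : 1 ≤ dayF x := dayOf_pos x.1 x.2 hs
      have h2 := maxD_mem ((ps.zip ss).map dayF) (dayF x) (by rw [hz]; simp)
      omega
  | succ fuel ih =>
    intro ps ss ans hpre hmax
    cases ps with
    | nil => simp [solLoop, g]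
    | cons p pt =>
      cases ss with
      | nil =>
        have h1 : solLoop (fuel + 1) (p :: pt) [] ans = solLoop fuel [] [] ans := by
          simp [solLoop, solInner]
        rw [h1]
        cases fuel <;> simp [solLoop, g]
      | cons s st =>
        -- names for the day lists
        have hpw : ∀ x ∈ (p :: pt).zip (s :: st),
            ((fun e => decide (e = 100)) ∘ (fun x : Int × Int => min (x.1 + x.2) 100)) x
              = ((fun e => decide (e = 1)) ∘ dayF) x := by
          intro x hx
          have hiff := dayOf_eq_one_iff x.1 x.2 (hpre x hx)
          simp only [Function.comp_apply, decide_eq_decide, dayF, hiff]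
          omega
        -- the two takeWhile lengths agree
        have hktw :
            (((( (p :: pt).zip (s :: st)).map (fun x => min (x.1 + x.2) 100)).takeWhile
              (fun e => decide (e = 100))).length)
            = ((((p :: pt).zip (s :: st)).map dayF).takeWhile (fun e => decide (e = 1))).length := by
          rw [List.takeWhile_map, List.takeWhile_map, List.length_map, List.length_map,
            takeWhile_congr_mem _ _ _ hpw]
        -- step the outer loop once
        simp only [solLoop]
        rw [if_neg (by simp : ¬(p :: pt = ([] : List Int)))]
        set z := (p :: pt).zip (s :: st) with hz
        set q := z.map (fun x => min (x.1 + x.2) 100) with hq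
        set D := z.map dayF with hD
        set K := (q.takeWhile (fun e => decide (e = 100))).length with hK
        have hzne : z ≠ [] := by simp [hz]
        have hqlen : q.length = z.length := by rw [hq, List.length_map]
        have hDlen : D.length = z.length := by rw [hD, List.length_map]
        have hKD : K = (D.takeWhile (fun e => decide (e = 1))).length := by
          rw [hK, hq, hD]; exact hktw
        have hKle : K ≤ z.length := by
          rw [hK, ← hqlen]; exact (List.takeWhile_prefix _).length_le
        have hDpos : ∀ d ∈ D, 1 ≤ d := by rw [hD]; exact dayF_pos z hpre
        have hmaxle : maxD D ≤ fuel + 1 := hmax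
        by_cases hall : K = z.length
        · -- every task finishes today: A appends the single release and stops
          have hinner : solInner q (s :: st) 0 = (0 + (K : Int), [], (s :: st).drop K, true) := by
            rw [inner_eq, if_pos ⟨by rw [← hK, hqlen, hall], by
              intro hqe; rw [hqe] at hqlen; simp [hz] at hqlen⟩]
          rw [hinner]
          have hone : ∀ d ∈ D, d = 1 := by
            have htws : D.takeWhile (fun e => decide (e = 1)) = D :=
              (List.takeWhile_prefix _).eq_of_length (by omega)
            intro d hd
            have := List.takeWhile_eq_self_iff.mp htws d hd
            simpa using this
          rw [g_all_one D (by intro h; rw [h] at hDlen; simp [hz] at hDlen) hone]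
          simp [hDlen, hall]
        · -- only a prefix (possibly empty) is released today
          have hKlt : K < z.length := by omega
          have hinner : solInner q (s :: st) 0
              = (0 + (K : Int), q.drop K, (s :: st).drop K, false) := by
            rw [inner_eq, if_neg (by rintro ⟨h1, -⟩; rw [← hK, hqlen] at h1; exact hall h1)]
          rw [hinner]
          -- the state after today, as a map over the dropped zip
          have hzip' : (q.drop K).zip ((s :: st).drop K) = (z.drop K).map advP := by
            rw [hq, zip_drop, hz, zip_adv]
            exact Eq.symm List.map_drop
          have hdays' : ((z.drop K).map advP).map dayF = ((z.drop K).map dayF).map deltaD := by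
            rw [List.map_map, List.map_map]
            apply List.map_congr_left
            intro x hx
            have hs1 : 1 ≤ x.2 := hpre x (List.drop_subset _ _ hx)
            simpa [dayF, advP, Function.comp] using dayOf_adv x.1 x.2 hs1
          have hdropD : (z.drop K).map dayF = D.drop K := by rw [hD]; exact List.map_drop
          have hdw : D.drop K = D.dropWhile (fun e => decide (e = 1)) := by
            rw [dropWhile_eq_drop, ← hKD]
          have hne' : D.drop K ≠ [] := by
            intro h
            have := congrArg List.length h
            simp [hDlen] at this
            omega
          have hhead2 : ∀ d ∈ (D.drop K).head?, 2 ≤ d := by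
            intro d hd
            rw [hdw] at hd
            have h1 := dropWhile_head_not D (fun e => decide (e = 1)) d hd
            have h2 : d ∈ D := (List.dropWhile_sublist _).subset (List.mem_of_mem_head? hd)
            have := hDpos d h2
            simp at h1
            omega
          have hD2 : 2 ≤ maxD D := by
            cases hc : D.drop K with
            | nil => exact absurd hc hne'
            | cons a u =>
              have ha : 2 ≤ a := hhead2 a (by rw [hc]; rfl)
              have : a ∈ D := (List.drop_subset _ _) (by rw [hc]; simp)
              have := maxD_mem D a this
              omega
          have hpos' : ∀ d ∈ D.drop K, 1 ≤ d := fun d hd => hDpos d (List.drop_subset _ _ hd)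
          have hmax' : maxD ((D.drop K).map deltaD) ≤ fuel := by
            have h1 := maxD_map_delta (D.drop K) hpos'
            have h2 := maxD_drop D K
            rw [Nat.max_def] at h1
            split_ifs at h1 <;> omega
          have hpre' : ∀ x ∈ (q.drop K).zip ((s :: st).drop K), 1 ≤ x.2 := by
            rw [hzip']
            intro x hx
            obtain ⟨y, hy, rfl⟩ := List.mem_map.mp hx
            exact hpre y (List.drop_subset _ _ hy)
          have hrec := ih (q.drop K) ((s :: st).drop K)
            (if 1 ≤ (0 + (K : Int)) then ans ++ [0 + (K : Int)] else ans) hpre'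
            (by rw [hzip', hdays', hdropD]; exact hmax')
          rw [hrec, hzip', hdays', hdropD, g_map_delta (D.drop K) hpos' hhead2]
          by_cases hk0 : K = 0
          · rw [if_neg (show ¬ (1 ≤ 0 + (K : Int)) by omega)]
            have : D.drop K = D := by rw [hk0]; rfl
            rw [this]
            simp
          · rw [if_pos (show 1 ≤ 0 + (K : Int) by omega)]
            rw [g_leading D hDpos K hKD (by omega) (by omega)]
            simp

theorem dayOf_le (p s : Int) (hs : 1 ≤ s) : dayOf p s ≤ max 1 (100 - p) := by
  unfold dayOf
  split_ifs with h
  · omega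
  · obtain ⟨hb1, hb2⟩ := fd_bounds p s hs
    have h2 : 2 ≤ -(PySem.Int.floordiv (p - 100) s) := by
      have := dayOf_two p s hs (by omega)
      unfold dayOf at this
      rw [if_neg (by omega)] at this
      exact this
    have h3 : (PySem.Int.floordiv (p - 100) s + 1) * s ≤ PySem.Int.floordiv (p - 100) s + 1 := by
      nlinarith
    omega

theorem fuel_enough (ps ss : List Int) (h : ∀ x ∈ ps.zip ss, 1 ≤ x.2) :
    maxD ((ps.zip ss).map dayF) ≤ solFuel ps := by
  induction ps generalizing ss with
  | nil => simp [maxD, solFuel]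
  | cons p pt ih =>
    cases ss with
    | nil => simp [maxD, solFuel]
    | cons s st =>
      have hs : 1 ≤ s := h (p, s) (by simp)
      have hd1 : 1 ≤ dayOf p s := dayOf_pos p s hs
      have hd2 : dayOf p s ≤ max 1 (100 - p) := dayOf_le p s hs
      have htail : maxD ((pt.zip st).map dayF) ≤ solFuel pt :=
        ih st (fun x hx => h x (by simp [hx]))
      have hcons : maxD (((p :: pt).zip (s :: st)).map dayF)
          = max (dayOf p s).toNat (maxD ((pt.zip st).map dayF)) := rfl
      have hfuel : solFuel (p :: pt) = 1 + ((100 - p).toNat + 1)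
          + ((pt.map (fun p => (100 - p).toNat + 1)).sum) := by
        simp [solFuel]
        omega
      have hfuel2 : solFuel pt = 1 + ((pt.map (fun p => (100 - p).toNat + 1)).sum) := rfl
      rw [hcons, hfuel]
      omega

-- ===== VERDICT (by name: the statement is the Claim_ definition above) =====
theorem solution_spec : Claim_equal_solution := by
  intro ps ss _dom hpre
  unfold Spec_solution
  rw [alt_eq_g, solution, main_loop (solFuel ps) ps ss [] hpre (fuel_enough ps ss hpre)]
  simp
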